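-- pv_equiv track=rewrite | github.com/l3eonk811/jrd | app/services/semantic_text.py | semantic_segments_from_tag_names
-- ===== SOURCE A (Python) =====
-- import unicodedata
-- from typing import Iterable
--
-- def _collapse_ws(value: str) -> str:
--     """Trim and collapse internal runs of whitespace (deterministic)."""
--     s = unicodedata.normalize("NFC", value).strip()
--     return " ".join(s.split()) if s else ""
--
-- def semantic_segments_from_tag_names(tag_names: Iterable[str]) -> list[str]:
--     """Test helper: same tag normalization as build_semantic_text (sorted tag: segments)."""
--     collapsed = [_collapse_ws(str(n)) for n in tag_names]
--     collapsed = [x for x in collapsed if x]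
--     seen: dict[str, str] = {}
--     for nm in collapsed:
--         key = unicodedata.normalize("NFC", nm).casefold()
--         if key not in seen or nm < seen[key]:
--             seen[key] = nm
--     return [
--         f"tag:{canonical}"
--         for canonical in sorted(seen.values(), key=lambda x: unicodedata.normalize("NFC", x).casefold())
--     ]
-- ===== SOURCE B (Python) =====
-- import unicodedata
--
--
-- def semantic_segments_from_tag_names(tag_names):
--     """Sort-then-group re-implementation: collect (casefold key, name) pairs,
--     sort once lexicographically, and emit the first name of each key group."""
--     pairs = []
--     for n in tag_names:
--         s = unicodedata.normalize("NFC", str(n)).strip()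
--         v = " ".join(s.split()) if s else ""
--         if v:
--             pairs.append((unicodedata.normalize("NFC", v).casefold(), v))
--     pairs.sort()
--     out = []
--     prev = None
--     for k, v in pairs:
--         if k != prev:
--             out.append(v)
--             prev = k
--     return [f"tag:{v}" for v in out]
-- ===== Notes on version B (the rewrite author's own statement) =====
-- stated objective: alternative
-- what changed: Replaces A's min-keeping dict plus a final key-sort of its values by building (casefold-key, name) pairs, sorting them once lexicographically, and emitting the first name of each key group in a single scan.
import Mathlib
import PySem

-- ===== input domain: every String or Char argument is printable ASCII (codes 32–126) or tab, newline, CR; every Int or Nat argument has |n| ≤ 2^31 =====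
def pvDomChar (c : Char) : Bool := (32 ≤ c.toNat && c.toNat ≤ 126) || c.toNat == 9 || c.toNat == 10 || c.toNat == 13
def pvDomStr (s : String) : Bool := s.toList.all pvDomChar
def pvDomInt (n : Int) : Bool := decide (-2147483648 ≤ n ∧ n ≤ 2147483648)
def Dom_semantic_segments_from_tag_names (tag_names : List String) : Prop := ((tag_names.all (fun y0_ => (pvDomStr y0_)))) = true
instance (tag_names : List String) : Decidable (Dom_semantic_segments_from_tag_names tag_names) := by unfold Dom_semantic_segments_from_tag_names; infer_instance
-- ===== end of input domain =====

-- B replaces A's min-keeping dict plus final key-sort by one lexicographic sort of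
-- (key, name) pairs followed by a single first-of-each-group scan (alternative decomposition,
-- same asymptotic cost). On the ASCII domain above, unicodedata.normalize('NFC', s) is the
-- identity and str.casefold() equals str.lower(); str(n) is the identity on str arguments.

-- ===== PORT A =====
-- _collapse_ws: NFC (identity on this ASCII domain), strip, then join of split()
def pvCollapseWs (value : String) : String :=
  let s := PySem.Str.strip value
  if s ≠ "" then PySem.Str.join " " (PySem.Str.split₀ s) else ""

def semantic_segments_from_tag_names (tag_names : List String) : List String :=
  let collapsed := tag_names.map (fun n => pvCollapseWs n)
  let collapsed2 := collapsed.filter (fun x => x ≠ "")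
  let seen := collapsed2.foldl (fun (d : PySem.Dict String String) nm =>
      let key := PySem.Str.lower nm
      match d.get? key with
      | none => d.insert key nm
      | some cur => if nm < cur then d.insert key nm else d) PySem.Dict.empty
  (PySem.List.sorted seen.values (fun x => PySem.Str.lower x)).map (fun c => "tag:" ++ c)

-- ===== PORT B =====
def semantic_segments_from_tag_names_alt (tag_names : List String) : List String :=
  let pairs := tag_names.foldl (fun (acc : List (String × String)) n =>
      let s := PySem.Str.strip n
      let v := if s ≠ "" then PySem.Str.join " " (PySem.Str.split₀ s) else ""
      if v ≠ "" then acc ++ [(PySem.Str.lower v, v)] else acc) []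
  let sp := PySem.List.sorted2 pairs (fun p => p.1) (fun p => p.2)
  let st := sp.foldl (fun (st : Option String × List String) kv =>
      if st.1 ≠ some kv.1 then (some kv.1, st.2 ++ [kv.2]) else st)
      ((none : Option String), ([] : List String))
  st.2.map (fun v => "tag:" ++ v)

-- ===== PRECONDITION & SPEC =====
def Spec_semantic_segments_from_tag_names (tag_names : List String) (out : List String) : Prop := out = semantic_segments_from_tag_names_alt tag_names
instance (tag_names : List String) (out : List String) : Decidable (Spec_semantic_segments_from_tag_names tag_names out) := by unfold Spec_semantic_segments_from_tag_names; infer_instance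

-- ===== CLAIM (what is proved, stated in full; the proofs are below) =====
def Claim_equal_semantic_segments_from_tag_names : Prop := ∀ (tag_names : List String), Dom_semantic_segments_from_tag_names tag_names → Spec_semantic_segments_from_tag_names tag_names (semantic_segments_from_tag_names tag_names)

-- ===== LEMMAS AND PROOFS =====

-- A's dict-updating step, over precomputed (key, name) pairs
def pvStep (d : PySem.Dict String String) (p : String × String) : PySem.Dict String String :=
  match d.get? p.1 with
  | none => d.insert p.1 p.2
  | some cur => if p.2 < cur then d.insert p.1 p.2 else d

def pvGm (L : List (String × String)) (d : PySem.Dict String String) : PySem.Dict String String :=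
  L.foldl pvStep d

-- minimum value carried by key k in L (none if the key is absent)
def pvLk : List (String × String) → String → Option String
  | [], _ => none
  | p :: t, k => if p.1 = k then
      some (match pvLk t k with | none => p.2 | some w => min p.2 w)
    else pvLk t k

def pvComb : Option String → Option String → Option String
  | none, o => o
  | some a, none => some a
  | some a, some b => some (min a b)

-- first pair of each key group (keys distinct afterwards)
def pvFirsts : List (String × String) → List (String × String)
  | [] => []
  | p :: t => p :: pvFirsts (t.filter (fun q => q.1 ≠ p.1))
termination_by L => L.length
decreasing_by
  have h1 := List.length_filter_le (fun x : {x // x ∈ t} => decide (x.val.1 ≠ p.1)) t.attach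
  simp only [List.length_attach] at h1
  simpa using Nat.lt_succ_of_le h1

def pvLexLE (a b : String × String) : Prop := a.1 < b.1 ∨ (a.1 = b.1 ∧ a.2 ≤ b.2)

def pvScanStep (st : Option String × List String) (kv : String × String) :
    Option String × List String :=
  if st.1 ≠ some kv.1 then (some kv.1, st.2 ++ [kv.2]) else st

lemma pvComb_assoc (x y z : Option String) :
    pvComb (pvComb x y) z = pvComb x (pvComb y z) := by
  cases x <;> cases y <;> cases z <;> simp [pvComb, min_assoc]

lemma pvLk_cons (p : String × String) (t : List (String × String)) (k : String) :
    pvLk (p :: t) k = if p.1 = k then pvComb (some p.2) (pvLk t k) else pvLk t k := by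
  cases h : pvLk t k <;> simp [pvLk, pvComb, h]

lemma pvGm_nil (d : PySem.Dict String String) : pvGm [] d = d := rfl

lemma pvGm_cons (p : String × String) (t : List (String × String))
    (d : PySem.Dict String String) : pvGm (p :: t) d = pvGm t (pvStep d p) := rfl

lemma pvStep_get?_self (d : PySem.Dict String String) (p : String × String) :
    (pvStep d p).get? p.1 = pvComb (d.get? p.1) (some p.2) := by
  unfold pvStep
  cases h : d.get? p.1 with
  | none => simp [pvComb, PySem.Dict.get?_insert_self]
  | some cur =>
    by_cases hlt : p.2 < cur
    · simp [hlt, pvComb, PySem.Dict.get?_insert_self, min_eq_right (le_of_lt hlt)]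
    · simp [hlt, pvComb, min_eq_left (not_lt.mp hlt), h]

lemma pvStep_get?_ne (d : PySem.Dict String String) (p : String × String) (k : String)
    (h : k ≠ p.1) : (pvStep d p).get? k = d.get? k := by
  unfold pvStep
  cases hg : d.get? p.1 with
  | none => exact PySem.Dict.get?_insert_of_ne d p.2 h
  | some cur =>
    dsimp only
    split_ifs with hlt
    · exact PySem.Dict.get?_insert_of_ne d p.2 h
    · rfl

lemma pvGm_get? (L : List (String × String)) (d : PySem.Dict String String) (k : String) :
    (pvGm L d).get? k = pvComb (d.get? k) (pvLk L k) := by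
  induction L generalizing d with
  | nil => cases h : d.get? k <;> simp [pvGm_nil, pvLk, pvComb, h]
  | cons p t IH =>
    rw [pvGm_cons, IH]
    by_cases hk : p.1 = k
    · subst hk
      rw [pvStep_get?_self, pvComb_assoc, pvLk_cons, if_pos rfl]
    · rw [pvStep_get?_ne d p k (fun he => hk he.symm), pvLk_cons, if_neg hk]

lemma pvLk_perm {L₁ L₂ : List (String × String)} (h : L₁.Perm L₂) (k : String) :
    pvLk L₁ k = pvLk L₂ k := by
  induction h with
  | nil => rfl
  | cons x _ IH => rw [pvLk_cons, pvLk_cons, IH]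
  | swap x y t =>
    rw [pvLk_cons, pvLk_cons, pvLk_cons, pvLk_cons]
    by_cases hy : y.1 = k <;> by_cases hx : x.1 = k <;>
      simp only [hy, hx, if_pos, if_false] <;>
      cases pvLk t k <;> simp [pvComb, min_comm, min_left_comm]
  | trans _ _ IH1 IH2 => rw [IH1, IH2]

lemma pvStep_nodup (d : PySem.Dict String String) (p : String × String)
    (h : d.keys.Nodup) : (pvStep d p).keys.Nodup := by
  unfold pvStep
  cases d.get? p.1 with
  | none => exact PySem.Dict.nodup_keys_insert _ _ _ h
  | some cur =>
    dsimp only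
    split_ifs with hlt
    · exact PySem.Dict.nodup_keys_insert _ _ _ h
    · exact h

lemma pvGm_nodup (L : List (String × String)) (d : PySem.Dict String String)
    (h : d.keys.Nodup) : (pvGm L d).keys.Nodup := by
  induction L generalizing d with
  | nil => exact h
  | cons p t IH => rw [pvGm_cons]; exact IH _ (pvStep_nodup d p h)

lemma pvMem_items_of_get? (d : PySem.Dict String String) {k v : String}
    (h : d.get? k = some v) : (k, v) ∈ d.items := by
  unfold PySem.Dict.get? at h
  obtain ⟨p, hfind, hv⟩ := Option.map_eq_some_iff.mp h
  have hmem := List.mem_of_find?_eq_some hfind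
  have hk : p.1 = k := by simpa using List.find?_some hfind
  obtain ⟨pk, pv⟩ := p
  simp only at hk hv
  rw [← hk, ← hv]
  exact hmem

lemma pvPerm_items (d₁ d₂ : PySem.Dict String String) (h₁ : d₁.keys.Nodup)
    (h₂ : d₂.keys.Nodup) (h : ∀ k, d₁.get? k = d₂.get? k) : d₁.items.Perm d₂.items := by
  have n₁ : d₁.items.Nodup := by
    have hh := h₁; simp only [PySem.Dict.keys] at hh; exact hh.of_map
  have n₂ : d₂.items.Nodup := by
    have hh := h₂; simp only [PySem.Dict.keys] at hh; exact hh.of_map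
  rw [List.perm_ext_iff_of_nodup n₁ n₂]
  rintro ⟨k, v⟩
  constructor
  · intro hm
    exact pvMem_items_of_get? d₂ ((h k) ▸ PySem.Dict.get?_of_mem_items d₁ hm h₁)
  · intro hm
    exact pvMem_items_of_get? d₁ ((h k) ▸ PySem.Dict.get?_of_mem_items d₂ hm h₂)

lemma pvFirsts_cons (p : String × String) (t : List (String × String)) :
    pvFirsts (p :: t) = p :: pvFirsts (t.filter (fun q => q.1 ≠ p.1)) := by
  rw [pvFirsts]

lemma pvFirsts_subset_aux : ∀ (n : Nat) (L : List (String × String)), L.length ≤ n →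
    ∀ q ∈ pvFirsts L, q ∈ L := by
  intro n
  induction n with
  | zero =>
    intro L hL q hq
    rw [List.eq_nil_of_length_eq_zero (Nat.le_zero.mp hL)] at hq
    simp [pvFirsts] at hq
  | succ n IH =>
    intro L hL q hq
    cases L with
    | nil => simp [pvFirsts] at hq
    | cons p t =>
      rw [pvFirsts_cons] at hq
      rcases List.mem_cons.mp hq with h | h
      · simp [h]
      · have hlen : (t.filter (fun q => q.1 ≠ p.1)).length ≤ n :=
          le_trans (List.length_filter_le _ _) (Nat.le_of_succ_le_succ hL)
        exact List.mem_cons_of_mem _ (List.mem_of_mem_filter (IH _ hlen q h))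

lemma pvFirsts_subset (L : List (String × String)) : ∀ q ∈ pvFirsts L, q ∈ L :=
  pvFirsts_subset_aux L.length L le_rfl

lemma pvFirsts_pairwise_aux : ∀ (n : Nat) (L : List (String × String)), L.length ≤ n →
    L.Pairwise pvLexLE → (pvFirsts L).Pairwise (fun a b => a.1 < b.1) := by
  intro n
  induction n with
  | zero =>
    intro L hL _
    rw [List.eq_nil_of_length_eq_zero (Nat.le_zero.mp hL)]
    simp [pvFirsts]
  | succ n IH =>
    intro L hL h
    cases L with
    | nil => simp [pvFirsts]
    | cons p t =>
      obtain ⟨hhead, htail⟩ := List.pairwise_cons.mp h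
      rw [pvFirsts_cons]
      have hlen : (t.filter (fun q => q.1 ≠ p.1)).length ≤ n :=
        le_trans (List.length_filter_le _ _) (Nat.le_of_succ_le_succ hL)
      refine List.Pairwise.cons ?_ (IH _ hlen (htail.filter _))
      intro q hq
      have hqf := pvFirsts_subset _ q hq
      have hqt := List.mem_of_mem_filter hqf
      have hne : q.1 ≠ p.1 := by simpa using List.of_mem_filter hqf
      rcases hhead q hqt with hlt | ⟨heq, _⟩
      · exact hlt
      · exact absurd heq.symm hne

lemma pvFirsts_pairwise (L : List (String × String)) (h : L.Pairwise pvLexLE) :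
    (pvFirsts L).Pairwise (fun a b => a.1 < b.1) :=
  pvFirsts_pairwise_aux L.length L le_rfl h

lemma pvGm_skip (t : List (String × String)) (k v : String) :
    ∀ (d : PySem.Dict String String), d.get? k = some v →
    (∀ q ∈ t, q.1 = k → v ≤ q.2) →
    pvGm t d = pvGm (t.filter (fun q => q.1 ≠ k)) d := by
  induction t with
  | nil => intro d _ _; rfl
  | cons q t IH =>
    intro d hd hmin
    by_cases hq : q.1 = k
    · have hstep : pvStep d q = d := by
        unfold pvStep
        rw [hq, hd]
        simp [not_lt.mpr (hmin q (List.mem_cons_self) hq)]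
      have hfilter : (q :: t).filter (fun r => r.1 ≠ k) = t.filter (fun r => r.1 ≠ k) := by
        simp [hq]
      rw [pvGm_cons, hstep, hfilter]
      exact IH d hd (fun r hr hrk => hmin r (List.mem_cons_of_mem _ hr) hrk)
    · have hfilter : (q :: t).filter (fun r => r.1 ≠ k) = q :: t.filter (fun r => r.1 ≠ k) := by
        simp [hq]
      rw [pvGm_cons, hfilter, pvGm_cons]
      refine IH (pvStep d q) ?_ (fun r hr hrk => hmin r (List.mem_cons_of_mem _ hr) hrk)
      rw [pvStep_get?_ne d q k (fun he => hq he.symm)]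
      exact hd

lemma pvGm_values_aux : ∀ (n : Nat) (L : List (String × String)), L.length ≤ n →
    ∀ (d : PySem.Dict String String),
    L.Pairwise pvLexLE → d.keys.Nodup → (∀ p ∈ L, d.contains p.1 = false) →
    (pvGm L d).values = d.values ++ (pvFirsts L).map (fun q => q.2) := by
  intro n
  induction n with
  | zero =>
    intro L hL d _ _ _
    rw [List.eq_nil_of_length_eq_zero (Nat.le_zero.mp hL)]
    simp [pvGm_nil, pvFirsts]
  | succ n IH =>
    intro L hL d hpw hnd hc
    cases L with
    | nil => simp [pvGm_nil, pvFirsts]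
    | cons p t =>
      obtain ⟨hhead, htail⟩ := List.pairwise_cons.mp hpw
      have hcont : d.contains p.1 = false := hc p (List.mem_cons_self)
      have hget : d.get? p.1 = none := (PySem.Dict.get?_eq_none_iff_contains d p.1).mpr hcont
      have hstep : pvStep d p = d.insert p.1 p.2 := by unfold pvStep; rw [hget]
      have hmins : ∀ q ∈ t, q.1 = p.1 → p.2 ≤ q.2 := by
        intro q hq hqk
        rcases hhead q hq with hlt | ⟨_, hle⟩
        · rw [hqk] at hlt; exact absurd hlt (lt_irrefl _)
        · exact hle
      have hlen : (t.filter (fun q => q.1 ≠ p.1)).length ≤ n :=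
        le_trans (List.length_filter_le _ _) (Nat.le_of_succ_le_succ hL)
      rw [pvGm_cons, hstep,
          pvGm_skip t p.1 p.2 _ (PySem.Dict.get?_insert_self d p.1 p.2) hmins]
      rw [IH _ hlen (d.insert p.1 p.2) (htail.filter _)
          (PySem.Dict.nodup_keys_insert _ _ _ hnd) ?_]
      · have hital : (d.insert p.1 p.2).items = d.items ++ [(p.1, p.2)] :=
          PySem.Dict.items_insert_of_not_contains d _ hcont
        rw [pvFirsts_cons]
        simp [PySem.Dict.values, hital]
      · intro q hq
        have hqt := List.mem_of_mem_filter hq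
        have hne : q.1 ≠ p.1 := by simpa using List.of_mem_filter hq
        rw [PySem.Dict.contains_insert]
        simp [hne, hc q (List.mem_cons_of_mem _ hqt)]

lemma pvGm_values (L : List (String × String)) (d : PySem.Dict String String)
    (hpw : L.Pairwise pvLexLE) (hnd : d.keys.Nodup)
    (hc : ∀ p ∈ L, d.contains p.1 = false) :
    (pvGm L d).values = d.values ++ (pvFirsts L).map (fun q => q.2) :=
  pvGm_values_aux L.length L le_rfl d hpw hnd hc

lemma pvScan : ∀ (S : List (String × String)) (prev : Option String) (out : List String),
    S.Pairwise pvLexLE → (∀ pk, prev = some pk → ∀ p ∈ S, pk ≤ p.1) →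
    (S.foldl pvScanStep (prev, out)).2 =
      out ++ (pvFirsts (S.filter (fun p => prev ≠ some p.1))).map (fun q => q.2) := by
  intro S
  induction S with
  | nil => intro prev out _ _; simp [pvFirsts]
  | cons p t IH =>
    intro prev out hpw hprev
    obtain ⟨hhead, htail⟩ := List.pairwise_cons.mp hpw
    have hle : ∀ q ∈ t, p.1 ≤ q.1 := by
      intro q hq
      rcases hhead q hq with hlt | ⟨heq, _⟩
      · exact le_of_lt hlt
      · exact le_of_eq heq
    rw [List.foldl_cons]
    by_cases hp : prev = some p.1
    · have hstep : pvScanStep (prev, out) p = (prev, out) := by simp [pvScanStep, hp]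
      have hfilter : (p :: t).filter (fun q => prev ≠ some q.1)
          = t.filter (fun q => prev ≠ some q.1) := by
        simp [hp]
      rw [hstep, hfilter, IH prev out htail ?_]
      intro pk hpk q hq
      rw [hp] at hpk
      exact (Option.some.inj hpk) ▸ hle q hq
    · have hstep : pvScanStep (prev, out) p = (some p.1, out ++ [p.2]) := by
        simp [pvScanStep, hp]
      rw [hstep, IH (some p.1) (out ++ [p.2]) htail
        (fun pk hpk q hq => (Option.some.inj hpk) ▸ hle q hq)]
      have h1 : (p :: t).filter (fun q => prev ≠ some q.1)
          = p :: t.filter (fun q => prev ≠ some q.1) := by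
        simp [hp]
      have h2 : (t.filter (fun q => prev ≠ some q.1)).filter (fun q => q.1 ≠ p.1)
          = t.filter (fun q => (some p.1 : Option String) ≠ some q.1) := by
        rw [List.filter_filter]
        apply List.filter_congr
        intro q hq
        by_cases hqp : q.1 = p.1
        · simp [hqp]
        · have hq1 : prev ≠ some q.1 := by
            cases prevc : prev with
            | none => simp
            | some pk =>
              have hpk := hprev pk prevc p (List.mem_cons_self)
              have hne : pk ≠ p.1 := fun he => hp (by rw [prevc, he])
              have hlt : pk < p.1 := lt_of_le_of_ne hpk hne
              have : pk ≠ q.1 := ne_of_lt (lt_of_lt_of_le hlt (hle q hq))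
              simpa using this
          have hpq : ¬ p.1 = q.1 := fun h => hqp h.symm
          simp [hq1, hqp, hpq]
      rw [h1, pvFirsts_cons, h2]
      simp

lemma pvSorted2_eq (xs : List (String × String)) :
    PySem.List.sorted2 xs (fun p => p.1) (fun p => p.2) =
    PySem.List.sorted xs (fun p => (toLex p : Lex (String × String))) := by
  rw [PySem.List.sorted_eq_foldl_insertBy]
  unfold PySem.List.sorted2
  simp only [Bool.false_eq_true, if_false]
  have hb : (fun (a b : String × String) =>
      (decide (a.1 < b.1) || (!decide (b.1 < a.1) && decide (a.2 < b.2))))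
      = (fun (a b : String × String) =>
        decide ((toLex a : Lex (String × String)) < toLex b)) := by
    funext a b
    rcases lt_trichotomy a.1 b.1 with h | h | h
    · simp [h, Prod.Lex.lt_iff]
    · simp [h, Prod.Lex.lt_iff]
    · simp [h, asymm h, Prod.Lex.lt_iff, ne_of_gt h]
  exact congrArg (fun f => List.foldl (fun acc x => PySem.List.insertBy f x acc) [] xs) hb


def pvPairs (tag_names : List String) : List (String × String) :=
  ((tag_names.map (fun n => pvCollapseWs n)).filter (fun x => x ≠ "")).map
    (fun v => (PySem.Str.lower v, v))

def pvSortedPairs (tag_names : List String) : List (String × String) :=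
  PySem.List.sorted (pvPairs tag_names) (fun p => (toLex p : Lex (String × String)))

lemma pvPairs_key (tag_names : List String) :
    ∀ q ∈ pvPairs tag_names, q.1 = PySem.Str.lower q.2 := by
  intro q hq
  obtain ⟨v, _, rfl⟩ := List.mem_map.mp hq
  rfl

lemma pvA_eq (tag_names : List String) : semantic_segments_from_tag_names tag_names =
    (PySem.List.sorted (pvGm (pvPairs tag_names) PySem.Dict.empty).values
      (fun x => PySem.Str.lower x)).map (fun c => "tag:" ++ c) := by
  unfold semantic_segments_from_tag_names pvPairs pvGm
  rw [List.foldl_map]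
  rfl

lemma pvB_fold : ∀ (l : List String) (acc : List (String × String)),
    l.foldl (fun acc n =>
      let s := PySem.Str.strip n
      let v := if s ≠ "" then PySem.Str.join " " (PySem.Str.split₀ s) else ""
      if v ≠ "" then acc ++ [(PySem.Str.lower v, v)] else acc) acc
    = acc ++ pvPairs l := by
  intro l
  induction l with
  | nil => intro acc; simp [pvPairs]
  | cons n t IH =>
    intro acc
    show t.foldl _ (if pvCollapseWs n ≠ "" then
        acc ++ [(PySem.Str.lower (pvCollapseWs n), pvCollapseWs n)] else acc)
      = acc ++ pvPairs (n :: t)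
    by_cases h : pvCollapseWs n = ""
    · rw [if_neg (by simpa using h), IH]
      simp [pvPairs, h]
    · rw [if_pos h, IH]
      simp [pvPairs, h]

lemma pvSorted_pairwise (tag_names : List String) :
    (pvSortedPairs tag_names).Pairwise pvLexLE := by
  have h := PySem.List.sorted_pairwise (pvPairs tag_names)
    (fun p => (toLex p : Lex (String × String)))
  refine h.imp ?_
  intro a b hab
  rw [Prod.Lex.le_iff] at hab
  simpa [pvLexLE] using hab

lemma pvB_eq (tag_names : List String) : semantic_segments_from_tag_names_alt tag_names =
    ((pvFirsts (pvSortedPairs tag_names)).map (fun q => q.2)).map (fun v => "tag:" ++ v) := by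
  unfold semantic_segments_from_tag_names_alt
  dsimp only
  rw [pvB_fold tag_names [], List.nil_append, pvSorted2_eq,
    (show PySem.List.sorted (pvPairs tag_names)
        (fun p => (toLex p : Lex (String × String))) = pvSortedPairs tag_names from rfl)]
  have hfoldl : (pvSortedPairs tag_names).foldl
      (fun (st : Option String × List String) kv =>
        if st.1 ≠ some kv.1 then (some kv.1, st.2 ++ [kv.2]) else st)
      ((none : Option String), ([] : List String))
      = (pvSortedPairs tag_names).foldl pvScanStep ((none : Option String), []) := rfl
  rw [hfoldl, pvScan (pvSortedPairs tag_names) none [] (pvSorted_pairwise tag_names)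
    (fun pk hpk => by simp at hpk)]
  have hfilter : (pvSortedPairs tag_names).filter
      (fun p => (none : Option String) ≠ some p.1) = pvSortedPairs tag_names :=
    List.filter_eq_self.mpr (fun a _ => by simp)
  rw [hfilter, List.nil_append]

lemma pvMain (tag_names : List String) :
    PySem.List.sorted (pvGm (pvPairs tag_names) PySem.Dict.empty).values
      (fun x => PySem.Str.lower x)
    = (pvFirsts (pvSortedPairs tag_names)).map (fun q => q.2) := by
  have hSP : (pvSortedPairs tag_names).Perm (pvPairs tag_names) :=
    PySem.List.sorted_perm _ _ _
  have hpw := pvSorted_pairwise tag_names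
  apply PySem.List.sorted_eq_of_perm_of_pairwise_lt
  · have hSv : (pvGm (pvSortedPairs tag_names) PySem.Dict.empty).values
        = (pvFirsts (pvSortedPairs tag_names)).map (fun q => q.2) := by
      have h := pvGm_values (pvSortedPairs tag_names) PySem.Dict.empty hpw
        PySem.Dict.nodup_keys_empty (fun p _ => PySem.Dict.contains_empty _)
      simpa [PySem.Dict.values] using h
    rw [← hSv]
    have hitems := pvPerm_items (pvGm (pvSortedPairs tag_names) PySem.Dict.empty)
      (pvGm (pvPairs tag_names) PySem.Dict.empty)
      (pvGm_nodup _ _ PySem.Dict.nodup_keys_empty)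
      (pvGm_nodup _ _ PySem.Dict.nodup_keys_empty)
      (fun k => by
        rw [pvGm_get?, pvGm_get?, PySem.Dict.get?_empty]
        exact congrArg (pvComb none) (pvLk_perm hSP k))
    have hmap := hitems.map (fun p : String × String => p.2)
    simpa [PySem.Dict.values] using hmap
  · rw [List.pairwise_map]
    have hkeys := pvFirsts_pairwise (pvSortedPairs tag_names) hpw
    refine List.Pairwise.imp_of_mem ?_ hkeys
    intro a b ha hb hab
    have haP := pvPairs_key tag_names a (hSP.subset (pvFirsts_subset _ a ha))
    have hbP := pvPairs_key tag_names b (hSP.subset (pvFirsts_subset _ b hb))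
    rw [← haP, ← hbP]
    exact hab

-- ===== VERDICT (by name: the statement is the Claim_ definition above) =====
theorem semantic_segments_from_tag_names_spec : Claim_equal_semantic_segments_from_tag_names := by
  intro tag_names _
  unfold Spec_semantic_segments_from_tag_names
  rw [pvA_eq, pvB_eq, pvMain]
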